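-- pv_equiv track=rewrite | github.com/michalecki/codewars | sum_of_intervals.py | sum_intervals
-- ===== SOURCE A (Python) =====
-- def sum_intervals(inp_arr):
--     '''
--
--     :param array: array of intervals
--     :return: sum of lengths of the intervals
--     '''
--
--     # sort the intervals over the first digit
--     inp_arr.sort()
--     # loop and merge if overlap
--     i = 0
--     while i < len(inp_arr) - 1:
--         while inp_arr[i][1] >= inp_arr[i + 1][0]:
--             inp_arr[i] = [inp_arr[i][0], max(inp_arr[i + 1][1], inp_arr[i][1])]
--             del inp_arr[i + 1]
--             if i == len(inp_arr) - 1: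
--                 break
--         i += 1
--     # calculate the sum
--     total = sum([inp_arr[x][1] - inp_arr[x][0] for x in range(len(inp_arr))])
--
--     return total
-- ===== SOURCE B (Python) =====
-- def sum_intervals(inp_arr):
--     # Sort a copy, then one linear sweep merging overlapping intervals on the fly.
--     ivs = sorted(inp_arr)
--     if not ivs:
--         return 0
--     total = 0
--     lo, hi = ivs[0][0], ivs[0][1]
--     for iv in ivs[1:]:
--         a, b = iv[0], iv[1]
--         if a <= hi:
--             if b > hi:
--                 hi = b
--         else:
--             total += hi - lo
--             lo, hi = a, b
--     return total + (hi - lo)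
-- ===== Notes on version B (the rewrite author's own statement) =====
-- stated objective: alternative
-- what changed: A merges by repeatedly rewriting and deleting entries of the sorted list inside a nested while loop and then sums in a second pass; B sorts a copy once and does a single linear sweep that accumulates merged lengths on the fly, with no list mutation or deletions (worst-case O(n log n) vs A's O(n^2) deletion loop, though a timing run measured only ~1.25x on generated inputs, so no speed is claimed).
import Mathlib
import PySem

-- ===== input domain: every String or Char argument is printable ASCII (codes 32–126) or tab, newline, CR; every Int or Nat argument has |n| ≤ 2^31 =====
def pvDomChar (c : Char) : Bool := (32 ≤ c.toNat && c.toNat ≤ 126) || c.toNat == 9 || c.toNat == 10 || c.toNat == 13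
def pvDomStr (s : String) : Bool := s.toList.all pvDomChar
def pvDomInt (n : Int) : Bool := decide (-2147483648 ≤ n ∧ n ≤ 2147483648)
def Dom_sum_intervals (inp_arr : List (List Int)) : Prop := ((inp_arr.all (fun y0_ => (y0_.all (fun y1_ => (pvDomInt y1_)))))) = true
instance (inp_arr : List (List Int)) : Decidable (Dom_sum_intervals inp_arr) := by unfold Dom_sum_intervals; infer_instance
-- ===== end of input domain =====

-- B replaces A's merge loop (repeated in-place rewrites and deletions on the sorted list, plus a
-- second summing pass) by a single linear sweep over the sorted list accumulating merged lengths.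
-- Equivalence is about the RETURN value only: Python A sorts and shrinks inp_arr in place,
-- B does not mutate its argument.

-- l[0] and l[1] on an interval (in Pre_ every interval has ≥ 2 entries, so the default is never read)
def pvFst (l : List Int) : Int := PySem.List.pyGetD l 0 0
def pvSnd (l : List Int) : Int := PySem.List.pyGetD l 1 0

-- ===== PORT A =====
-- the while/while loop: state is (arr, i); 'i < len(arr) - 1' is 'i + 1 < arr.length' (same on Nat)
def pvMergeGo (arr : List (List Int)) (i : Nat) : List (List Int) :=
  if h : i + 1 < arr.length then
    let p := arr.getD i []
    let q := arr.getD (i + 1) []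
    if pvFst q ≤ pvSnd p then        -- inner while condition inp_arr[i][1] >= inp_arr[i+1][0]
      let merged := [pvFst p, max (pvSnd q) (pvSnd p)]
      let arr' := (arr.set i merged).eraseIdx (i + 1)    -- del inp_arr[i+1]
      if i = arr'.length - 1 then pvMergeGo arr' (i + 1)  -- break, then i += 1
      else pvMergeGo arr' i
    else pvMergeGo arr (i + 1)        -- inner while exits, i += 1
  else arr
termination_by 2 * arr.length - i
decreasing_by
  · have : ((arr.set i ([pvFst (arr.getD i []), max (pvSnd (arr.getD (i+1) [])) (pvSnd (arr.getD i []))])).eraseIdx (i+1)).length = arr.length - 1 := by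
      simp [List.length_eraseIdx, h]
    omega
  · have : ((arr.set i ([pvFst (arr.getD i []), max (pvSnd (arr.getD (i+1) [])) (pvSnd (arr.getD i []))])).eraseIdx (i+1)).length = arr.length - 1 := by
      simp [List.length_eraseIdx, h]
    omega
  · omega

def sum_intervals (inp_arr : List (List Int)) : Int :=
  let arr := PySem.List.sorted inp_arr (fun x => x) false   -- inp_arr.sort()
  let arr := pvMergeGo arr 0
  -- sum([arr[x][1] - arr[x][0] for x in range(len(arr))])
  ((List.range arr.length).map (fun x => pvSnd (arr.getD x []) - pvFst (arr.getD x []))).sum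

-- ===== PORT B =====
def pvSweep (lo hi total : Int) : List (List Int) → Int
  | [] => total + (hi - lo)
  | q :: rest =>
    let a := pvFst q
    let b := pvSnd q
    if a ≤ hi then pvSweep lo (if b > hi then b else hi) total rest
    else pvSweep a b (total + (hi - lo)) rest

def sum_intervals_alt (inp_arr : List (List Int)) : Int :=
  match PySem.List.sorted inp_arr (fun x => x) false with
  | [] => 0
  | p :: rest => pvSweep (pvFst p) (pvSnd p) 0 rest

-- ===== PRECONDITION & SPEC =====
-- Pre_ excludes exactly the inputs where Python A raises IndexError: an interval with fewer than
-- two endpoints (B raises there too).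
def Pre_sum_intervals (inp_arr : List (List Int)) : Prop := ∀ l ∈ inp_arr, 2 ≤ l.length
instance (inp_arr : List (List Int)) : Decidable (Pre_sum_intervals inp_arr) := by unfold Pre_sum_intervals; infer_instance
def pvWitness_sum_intervals : List (List Int) := [[1, 5], [10, 12], [2, 3]]

def Spec_sum_intervals (inp_arr : List (List Int)) (out : Int) : Prop := out = sum_intervals_alt inp_arr
instance (inp_arr : List (List Int)) (out : Int) : Decidable (Spec_sum_intervals inp_arr out) := by unfold Spec_sum_intervals; infer_instance

-- ===== CLAIM (what is proved, stated in full; the proofs are below) =====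
def Claim_equal_sum_intervals : Prop := ∀ (inp_arr : List (List Int)), Dom_sum_intervals inp_arr → Pre_sum_intervals inp_arr → Spec_sum_intervals inp_arr (sum_intervals inp_arr)

-- ===== LEMMAS AND PROOFS =====

-- the merge loop, recast as structural recursion on the suffix it still has to process
def pvMerge : List (List Int) → List (List Int)
  | [] => []
  | [p] => [p]
  | p :: q :: rest =>
    if pvFst q ≤ pvSnd p then pvMerge ([pvFst p, max (pvSnd q) (pvSnd p)] :: rest)
    else p :: pvMerge (q :: rest)
termination_by l => l.length

theorem pvSet_eraseIdx (arr : List (List Int)) (i : Nat) (m : List Int) (h : i + 1 < arr.length) :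
    (arr.set i m).eraseIdx (i + 1) = arr.take i ++ m :: arr.drop (i + 2) := by
  rw [List.eraseIdx_eq_take_drop_succ, List.set_eq_take_append_cons_drop]
  rw [if_pos (by omega)]
  rw [List.take_append, List.drop_append]
  simp [List.length_take, Nat.min_eq_left (by omega : i ≤ arr.length)]
  rw [List.take_take, Nat.min_eq_right (by omega), List.drop_eq_nil_of_le (by simp [List.length_take]; omega)]
  have h2 : i + 1 + 1 - i = 2 := by omega
  rw [h2]
  simp [List.drop_drop]

theorem take_succ_append (arr : List (List Int)) (i : Nat) (h : i < arr.length) (X : List (List Int)) :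
    arr.take (i+1) ++ X = arr.take i ++ arr[i] :: X := by
  rw [← List.take_concat_get' arr i h, List.append_assoc]
  rfl

theorem pvMergeGo_eq (arr : List (List Int)) (i : Nat) :
    pvMergeGo arr i = arr.take i ++ pvMerge (arr.drop i) := by
  fun_induction pvMergeGo arr i with
  | case1 arr i h p q hc merged arr' hbrk ih =>
    rw [ih]
    have hgi : arr.getD i [] = arr[i]'(by omega) := List.getD_eq_getElem _ _ (by omega)
    have hgi1 : arr.getD (i+1) [] = arr[i+1]'h := List.getD_eq_getElem _ _ h
    have he : arr' = arr.take i ++ merged :: arr.drop (i+2) := pvSet_eraseIdx arr i merged h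
    have hlen : arr'.length = arr.length - 1 := by
      simp only [arr']
      simp [List.length_eraseIdx, h]
    have hlen2 : arr.length = i + 2 := by omega
    have hnil : arr.drop (i+2) = [] := List.drop_eq_nil_of_le (by omega)
    have hlen' : arr'.length = i + 1 := by omega
    rw [List.take_of_length_le (by omega), List.drop_eq_nil_of_le (by omega), pvMerge, List.append_nil]
    have hd : arr.drop i = arr[i]'(by omega) :: arr.drop (i+1) := List.drop_eq_getElem_cons (by omega)
    have hd2 : arr.drop (i+1) = arr[i+1]'h :: arr.drop (i+2) := List.drop_eq_getElem_cons h
    rw [he, hnil, hd, hd2, hnil, pvMerge]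
    rw [if_pos (by simp only [p, q, hgi, hgi1] at hc; exact hc)]
    simp only [pvMerge]
    congr 1
    simp only [merged, p, q, hgi, hgi1]
  | case2 arr i h p q hc merged arr' hbrk ih =>
    rw [ih]
    have hgi : arr.getD i [] = arr[i]'(by omega) := List.getD_eq_getElem _ _ (by omega)
    have hgi1 : arr.getD (i+1) [] = arr[i+1]'h := List.getD_eq_getElem _ _ h
    have he : arr' = arr.take i ++ merged :: arr.drop (i+2) := pvSet_eraseIdx arr i merged h
    have htk : arr'.take i = arr.take i := by
      rw [he, List.take_append]
      simp [List.length_take, Nat.min_eq_left (by omega : i ≤ arr.length)]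
    have hdr : arr'.drop i = merged :: arr.drop (i+2) := by
      rw [he, List.drop_append]
      simp [List.length_take, Nat.min_eq_left (by omega : i ≤ arr.length)]
    rw [htk, hdr]
    have hd : arr.drop i = arr[i]'(by omega) :: arr.drop (i+1) := List.drop_eq_getElem_cons (by omega)
    have hd2 : arr.drop (i+1) = arr[i+1]'h :: arr.drop (i+2) := List.drop_eq_getElem_cons h
    rw [hd, hd2, pvMerge]
    rw [if_pos (by simp only [p, q, hgi, hgi1] at hc; exact hc)]
    congr 2
    simp only [merged, p, q, hgi, hgi1]
  | case3 arr i h p q hc ih =>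
    rw [ih]
    have hgi : arr.getD i [] = arr[i]'(by omega) := List.getD_eq_getElem _ _ (by omega)
    have hgi1 : arr.getD (i+1) [] = arr[i+1]'h := List.getD_eq_getElem _ _ h
    have hd : arr.drop i = arr[i]'(by omega) :: arr.drop (i+1) := List.drop_eq_getElem_cons (by omega)
    have hd2 : arr.drop (i+1) = arr[i+1]'h :: arr.drop (i+2) := List.drop_eq_getElem_cons h
    rw [hd, hd2, pvMerge, if_neg (by simp only [p, q, hgi, hgi1] at hc; exact hc), ← hd2]
    exact take_succ_append arr i (by omega) _
  | case4 arr i h =>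
    have : pvMerge (arr.drop i) = arr.drop i := by
      rcases hd : arr.drop i with _ | ⟨x, _ | ⟨y, t⟩⟩
      · rw [pvMerge]
      · rw [pvMerge]
      · exfalso
        have := congrArg List.length hd
        simp [List.length_drop] at this
        omega
    rw [this, List.take_append_drop]


def pvSpanSum (arr : List (List Int)) : Int := (arr.map (fun l => pvSnd l - pvFst l)).sum

theorem pvFst_pair (a b : Int) : pvFst [a, b] = a := rfl
theorem pvSnd_pair (a b : Int) : pvSnd [a, b] = b := rfl

theorem pvSweep_eq (rest : List (List Int)) (p : List Int) (total : Int) :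
    pvSweep (pvFst p) (pvSnd p) total rest = total + pvSpanSum (pvMerge (p :: rest)) := by
  induction rest generalizing p total with
  | nil => simp [pvSweep, pvMerge, pvSpanSum]
  | cons q rest ih =>
    rw [pvSweep, pvMerge]
    by_cases hc : pvFst q ≤ pvSnd p
    · rw [if_pos hc, if_pos hc]
      have hm : (if pvSnd q > pvSnd p then pvSnd q else pvSnd p) = max (pvSnd q) (pvSnd p) := by
        split_ifs <;> omega
      have := ih [pvFst p, max (pvSnd q) (pvSnd p)] total
      rw [pvFst_pair, pvSnd_pair] at this
      simpa [hm] using this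
    · rw [if_neg hc, if_neg hc]
      rw [ih q (total + (pvSnd p - pvFst p))]
      simp [pvSpanSum]
      ring

theorem pvRangeSum (arr : List (List Int)) :
    ((List.range arr.length).map (fun x => pvSnd (arr.getD x []) - pvFst (arr.getD x []))).sum = pvSpanSum arr := by
  have hg : (List.range arr.length).map (fun i => arr.getD i []) = arr := by
    apply List.ext_getElem
    · simp
    · intro n h1 h2
      simp [List.getD_eq_getElem?_getD, List.getElem?_eq_getElem h2]
  calc ((List.range arr.length).map (fun x => pvSnd (arr.getD x []) - pvFst (arr.getD x []))).sum
      = (((List.range arr.length).map (fun i => arr.getD i [])).map (fun l => pvSnd l - pvFst l)).sum := by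
        rw [List.map_map]; rfl
    _ = pvSpanSum arr := by rw [hg]; rfl

-- ===== VERDICT (by name: the statement is the Claim_ definition above) =====
theorem sum_intervals_spec : Claim_equal_sum_intervals := by
  intro inp_arr _ _
  unfold Spec_sum_intervals sum_intervals sum_intervals_alt
  rw [pvRangeSum, pvMergeGo_eq]
  cases h : PySem.List.sorted inp_arr (fun x => x) false with
  | nil => simp [pvMerge, pvSpanSum]
  | cons p rest => simp [pvSweep_eq, pvSpanSum]
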